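-- pv_equiv track=rewrite | github.com/rkdalsdn94/algoalgo | solved_ac/bronze_2/Equal_Total_Scores_4968.py | find_exchange
-- ===== SOURCE A (Python) =====
-- def find_exchange(taro_cards, hanako_cards):
--     # 현재 각자의 총점 계산
--     taro_sum = sum(taro_cards)
--     hanako_sum = sum(hanako_cards)
--
--     # 가능한 모든 교환 케이스를 확인
--     min_sum = float('inf')
--     res = None
--
--     for _, taro_card in enumerate(taro_cards):
--         for _, hanako_card in enumerate(hanako_cards):
--             # 카드를 교환했을 때의 새로운 총점 계산
--             new_taro_sum = taro_sum - taro_card + hanako_card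
--             new_hanako_sum = hanako_sum - hanako_card + taro_card
--
--             # 교환 후 총점이 같아지는 경우
--             if new_taro_sum == new_hanako_sum:
--                 # 교환하는 카드들의 합이 최소인 경우를 찾음
--                 current_sum = taro_card + hanako_card
--                 if current_sum < min_sum:
--                     min_sum = current_sum
--                     res = (taro_card, hanako_card)
--
--     return res
-- ===== SOURCE B (Python) =====
-- def find_exchange(taro_cards, hanako_cards):
--     # Swap (t, h) equalizes totals iff h - t == (hanako_sum - taro_sum) / 2,
--     # so for each taro card there is a unique matching hanako value: look it
--     # up in a hash set and keep the minimal taro card (minimal pair sum).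
--     d = sum(hanako_cards) - sum(taro_cards)
--     if d % 2:
--         return None
--     k = d // 2
--     hset = set(hanako_cards)
--     best = None
--     for t in taro_cards:
--         if t + k in hset and (best is None or t < best):
--             best = t
--     if best is None:
--         return None
--     return (best, best + k)
-- ===== Notes on version B (the rewrite author's own statement) =====
-- stated objective: faster
-- what changed: Replaces the nested scan over all card pairs by the algebraic observation that the matching hanako card is uniquely determined (h = t + (hanako_sum - taro_sum)/2), using one hash-set lookup per taro card and tracking the minimal taro card.
import Mathlib
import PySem

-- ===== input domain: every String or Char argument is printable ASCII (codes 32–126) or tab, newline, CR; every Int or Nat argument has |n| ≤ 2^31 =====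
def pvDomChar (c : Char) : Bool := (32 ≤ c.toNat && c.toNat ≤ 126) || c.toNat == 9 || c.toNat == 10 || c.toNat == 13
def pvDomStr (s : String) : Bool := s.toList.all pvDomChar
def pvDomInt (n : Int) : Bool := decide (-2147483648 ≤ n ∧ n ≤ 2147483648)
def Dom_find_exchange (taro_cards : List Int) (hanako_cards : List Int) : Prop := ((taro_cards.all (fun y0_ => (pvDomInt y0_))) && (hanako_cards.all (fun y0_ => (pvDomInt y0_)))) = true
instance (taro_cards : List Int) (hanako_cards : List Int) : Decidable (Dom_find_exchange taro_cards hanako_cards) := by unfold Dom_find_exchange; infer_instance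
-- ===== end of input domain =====

-- B replaces A's O(n*m) pair scan by a hash-set lookup of the uniquely determined partner card (faster).

-- ===== PORT A =====
-- state = (min_sum, res); Python's float('inf') initial min_sum is modelled as `none`
-- (min_sum is `some m` exactly once res is set, and every comparison `current_sum < min_sum`
-- is true against `none`, exactly as against float('inf')).
def find_exchange (taro_cards : List Int) (hanako_cards : List Int) : Option (List Int) :=
  let taro_sum := taro_cards.sum
  let hanako_sum := hanako_cards.sum
  let st := taro_cards.foldl (fun st taro_card =>
    hanako_cards.foldl (fun st hanako_card =>
      let new_taro_sum := taro_sum - taro_card + hanako_card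
      let new_hanako_sum := hanako_sum - hanako_card + taro_card
      if new_taro_sum = new_hanako_sum then
        let current_sum := taro_card + hanako_card
        if (match st.1 with | none => true | some m => decide (current_sum < m)) then
          (some current_sum, some (taro_card, hanako_card))
        else st
      else st) st) ((none, none) : Option Int × Option (Int × Int))
  match st.2 with
  | none => none
  | some (a, b) => some [a, b]

-- ===== PORT B =====
def find_exchange_alt (taro_cards : List Int) (hanako_cards : List Int) : Option (List Int) :=
  let d := hanako_cards.sum - taro_cards.sum
  if PySem.Int.mod d 2 ≠ 0 then none
  else
    let k := PySem.Int.floordiv d 2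
    let hset := PySem.Set.ofList hanako_cards
    let best := taro_cards.foldl (fun best t =>
      if PySem.Set.contains hset (t + k) &&
         (match best with | none => true | some b => decide (t < b)) then some t else best)
      (none : Option Int)
    match best with
    | none => none
    | some t => some [t, t + k]

-- ===== PRECONDITION & SPEC =====
def Spec_find_exchange (taro_cards : List Int) (hanako_cards : List Int) (out : Option (List Int)) : Prop := out = find_exchange_alt taro_cards hanako_cards
instance (taro_cards : List Int) (hanako_cards : List Int) (out : Option (List Int)) : Decidable (Spec_find_exchange taro_cards hanako_cards out) := by unfold Spec_find_exchange; infer_instance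

-- ===== CLAIM (what is proved, stated in full; the proofs are below) =====
def Claim_equal_find_exchange : Prop := ∀ (taro_cards : List Int) (hanako_cards : List Int), Dom_find_exchange taro_cards hanako_cards → Spec_find_exchange taro_cards hanako_cards (find_exchange taro_cards hanako_cards)

-- ===== LEMMAS AND PROOFS =====

-- A's inner-loop step for a qualifying hanako card h = t + k (candidate sum t + (t+k)).
def pvAstep (k t : Int) (st : Option Int × Option (Int × Int)) : Option Int × Option (Int × Int) :=
  if (match st.1 with | none => true | some m => decide (t + (t + k) < m)) then
    (some (t + (t + k)), some (t, t + k))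
  else st

theorem pvAstep_idem (k t : Int) (st : Option Int × Option (Int × Int)) :
    pvAstep k t (pvAstep k t st) = pvAstep k t st := by
  unfold pvAstep
  rcases st with ⟨m, r⟩
  rcases m with _ | m
  · simp
  · by_cases h : t + (t + k) < m
    · simp [h]
    · simp [h]

-- Inner loop, odd total difference: no pair ever qualifies.
theorem pvInner_odd (ts hs t : Int) (hodd : ¬ (2 ∣ (hs - ts)))
    (han : List Int) (st : Option Int × Option (Int × Int)) :
    han.foldl (fun st h =>
      if ts - t + h = hs - h + t then
        if (match st.1 with | none => true | some m => decide (t + h < m)) then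
          (some (t + h), some (t, h))
        else st
      else st) st = st := by
  induction han generalizing st with
  | nil => rfl
  | cons h rest ih =>
    simp only [List.foldl_cons]
    have : ¬ (ts - t + h = hs - h + t) := by
      intro he
      exact hodd ⟨h - t, by omega⟩
    rw [if_neg this, ih]

-- Inner loop, even difference hs - ts = 2k: it is the A-step iff t + k occurs in hanako's list.
theorem pvInner_even (ts hs t k : Int) (hk : hs - ts = 2 * k)
    (han : List Int) (st : Option Int × Option (Int × Int)) :
    han.foldl (fun st h =>
      if ts - t + h = hs - h + t then
        if (match st.1 with | none => true | some m => decide (t + h < m)) then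
          (some (t + h), some (t, h))
        else st
      else st) st = if (t + k) ∈ han then pvAstep k t st else st := by
  induction han generalizing st with
  | nil => rfl
  | cons h rest ih =>
    simp only [List.foldl_cons, List.mem_cons]
    by_cases hq : ts - t + h = hs - h + t
    · have hh : h = t + k := by omega
      subst hh
      rw [if_pos hq]
      have hstep : (if (match st.1 with | none => true | some m => decide (t + (t + k) < m)) = true then
          (some (t + (t + k)), some (t, t + k)) else st) = pvAstep k t st := rfl
      rw [hstep, ih]
      by_cases hm : (t + k) ∈ rest <;> simp [hm, pvAstep_idem]
    · have hne : t + k ≠ h := by omega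
      rw [if_neg hq, ih]
      by_cases hm : (t + k) ∈ rest <;> simp [hm, hne]

-- Relation between A's state and B's state.
def pvRel (k : Int) (b : Option Int) : Option Int × Option (Int × Int) :=
  (b.map (fun t => t + (t + k)), b.map (fun t => (t, t + k)))

theorem pvAstep_rel (k t : Int) (b : Option Int) :
    pvAstep k t (pvRel k b) =
      pvRel k (if (match b with | none => true | some bb => decide (t < bb)) then some t else b) := by
  rcases b with _ | bb
  · simp [pvAstep, pvRel]
  · by_cases h : t < bb
    · simp [pvAstep, pvRel, h]
      omega
    · simp [pvAstep, pvRel, h]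
      omega

-- Outer loop, odd total difference: the state is never touched.
theorem pvOuter_odd (ts hs : Int) (hodd : ¬ (2 ∣ (hs - ts))) (taro han : List Int)
    (st : Option Int × Option (Int × Int)) :
    taro.foldl (fun st t =>
      han.foldl (fun st h =>
        if ts - t + h = hs - h + t then
          if (match st.1 with | none => true | some m => decide (t + h < m)) then
            (some (t + h), some (t, h))
          else st
        else st) st) st = st := by
  induction taro generalizing st with
  | nil => rfl
  | cons t rest ih => simp only [List.foldl_cons, pvInner_odd ts hs t hodd han st, ih]

-- Outer loop, even difference: A's fold simulates B's fold through pvRel.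
theorem pvOuter_even (ts hs k : Int) (hk : hs - ts = 2 * k) (taro han : List Int) (b : Option Int) :
    taro.foldl (fun st t =>
      han.foldl (fun st h =>
        if ts - t + h = hs - h + t then
          if (match st.1 with | none => true | some m => decide (t + h < m)) then
            (some (t + h), some (t, h))
          else st
        else st) st) (pvRel k b)
    = pvRel k (taro.foldl (fun best t =>
        if PySem.Set.contains (PySem.Set.ofList han) (t + k) &&
           (match best with | none => true | some bb => decide (t < bb)) then some t else best) b) := by
  induction taro generalizing b with
  | nil => rfl
  | cons t rest ih =>
    simp only [List.foldl_cons, pvInner_even ts hs t k hk han]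
    by_cases hm : (t + k) ∈ han
    · have hc : PySem.Set.contains (PySem.Set.ofList han) (t + k) = true := by
        rw [PySem.Set.contains_iff, PySem.Set.mem_ofList]; exact hm
      rw [if_pos hm, pvAstep_rel, hc]
      simp only [Bool.true_and]
      exact ih _
    · have hc : PySem.Set.contains (PySem.Set.ofList han) (t + k) = false := by
        rw [Bool.eq_false_iff, Ne, PySem.Set.contains_iff, PySem.Set.mem_ofList]; exact hm
      rw [if_neg hm, hc]
      simp only [Bool.false_and, if_neg Bool.false_ne_true]
      exact ih b

-- ===== VERDICT (by name: the statement is the Claim_ definition above) =====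
theorem find_exchange_spec : Claim_equal_find_exchange := by
  intro taro han _
  show find_exchange taro han = find_exchange_alt taro han
  simp only [find_exchange, find_exchange_alt]
  by_cases hpar : PySem.Int.mod (han.sum - taro.sum) 2 = 0
  · -- even difference
    have hdvd : (2 : Int) ∣ (han.sum - taro.sum) := by
      rwa [← PySem.Int.mod_eq_zero_iff_dvd]
    obtain ⟨k, hk⟩ := hdvd
    have hk' : han.sum - taro.sum = 2 * k := hk
    have hfd : PySem.Int.floordiv (han.sum - taro.sum) 2 = k := by
      rw [PySem.Int.floordiv_eq_ediv_of_pos (by norm_num), hk']; omega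
    rw [if_neg (by simpa using hpar)]
    have h0 : ((none, none) : Option Int × Option (Int × Int)) = pvRel k none := rfl
    rw [hfd, h0, pvOuter_even taro.sum han.sum k hk' taro han none]
    rcases hb : taro.foldl (fun best t =>
        if PySem.Set.contains (PySem.Set.ofList han) (t + k) &&
           (match best with | none => true | some bb => decide (t < bb)) then some t else best)
        (none : Option Int) with _ | t <;> rw [hb] <;> rfl
  · -- odd difference: A never updates, B returns none up front
    have hodd : ¬ ((2 : Int) ∣ (han.sum - taro.sum)) := by
      intro hd
      exact hpar (by rw [← PySem.Int.mod_eq_zero_iff_dvd] at hd; exact hd)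
    rw [if_pos (by simpa using hpar), pvOuter_odd taro.sum han.sum hodd taro han]
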